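-- pv_equiv track=rewrite | github.com/ansonanto/Google-Foobar | freeTheBunnies.py | branches
-- ===== SOURCE A (Python) =====
-- def branches(bunniesLeft, currentBranch, rabbitsLeft, items):
--     if bunniesLeft == 0:
--         return [items]
--     if bunniesLeft > 0 and currentBranch <= rabbitsLeft:
--         i = currentBranch + 1
--         accumulated = []
--         highestBranchValue = rabbitsLeft - bunniesLeft + 1
--         while i <= highestBranchValue:
--             nextArray = items[:]
--             nextArray.append(i)
--             accumulated.extend(branches(bunniesLeft - 1, i, rabbitsLeft, nextArray))
--             i += 1
--         return accumulated
-- ===== SOURCE B (Python) =====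
-- def branches(bunniesLeft, currentBranch, rabbitsLeft, items):
--     # Iterative layered expansion instead of recursion: a worklist of
--     # (last index, partial selection) pairs is extended by one branch
--     # index per round, for bunniesLeft rounds; a round r only tries
--     # indices that leave room for the bunniesLeft-1-r picks still due.
--     if bunniesLeft == 0:
--         return [items]
--     if bunniesLeft > 0 and currentBranch <= rabbitsLeft:
--         partials = [(currentBranch, items)]
--         for r in range(bunniesLeft):
--             if not partials:
--                 break
--             hi = rabbitsLeft - (bunniesLeft - 1 - r)
--             partials = [(j, acc + [j])
--                         for (last, acc) in partials
--                         for j in range(last + 1, hi + 1)]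
--         return [acc for (_, acc) in partials]
-- ===== Notes on version B (the rewrite author's own statement) =====
-- stated objective: alternative
-- what changed: Replaces A's pruned depth-first recursion by a recursion-free iterative breadth-first expansion: a worklist of (last, partial) pairs grows by one branch index per round for bunniesLeft rounds, stopping early when the worklist is empty.
-- outside the precondition, e.g. on branches(-1, 0, 5, []): A returns None, B returns None; on branches(2, 7, 5, []): A returns None, B returns None
import Mathlib
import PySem

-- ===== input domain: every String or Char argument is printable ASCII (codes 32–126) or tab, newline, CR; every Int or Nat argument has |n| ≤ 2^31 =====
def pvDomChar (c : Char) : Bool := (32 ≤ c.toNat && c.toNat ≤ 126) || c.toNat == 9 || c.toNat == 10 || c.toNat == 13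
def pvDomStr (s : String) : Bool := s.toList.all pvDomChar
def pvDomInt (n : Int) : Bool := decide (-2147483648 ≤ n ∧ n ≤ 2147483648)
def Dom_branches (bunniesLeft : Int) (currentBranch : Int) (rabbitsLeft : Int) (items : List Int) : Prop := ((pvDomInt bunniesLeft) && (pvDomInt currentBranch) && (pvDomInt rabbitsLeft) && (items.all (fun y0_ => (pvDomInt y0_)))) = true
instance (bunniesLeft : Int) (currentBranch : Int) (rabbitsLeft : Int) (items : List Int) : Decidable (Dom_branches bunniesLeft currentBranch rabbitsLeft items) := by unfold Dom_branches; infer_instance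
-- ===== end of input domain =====

-- B replaces A's recursion by an iterative layered expansion of partial selections (objective: alternative).

-- ===== PORT A =====
-- A's while loop extends `accumulated` with each recursive result; ported as a
-- flatMap over the loop's index range (pyRange = Python range, step 1).
def branches (bunniesLeft : Int) (currentBranch : Int) (rabbitsLeft : Int) (items : List Int) : List (List Int) :=
  if bunniesLeft = 0 then [items]
  else if _h : 0 < bunniesLeft ∧ currentBranch ≤ rabbitsLeft then
    (PySem.List.pyRange (currentBranch + 1) (rabbitsLeft - bunniesLeft + 2) 1).flatMap
      (fun i => branches (bunniesLeft - 1) i rabbitsLeft (items ++ [i]))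
  else []  -- Python A returns None here; excluded by Pre_branches
termination_by bunniesLeft.toNat
decreasing_by omega

-- ===== PORT B =====
-- one round of B's loop body, n+1 = rounds still to run (so hi = rabbitsLeft - n);
-- extend every partial (last, acc) by each j in range(last+1, hi+1), break when empty
def branchesAltLoop (n : Nat) (rabbitsLeft : Int) (partials : List (Int × List Int)) : List (Int × List Int) :=
  match n with
  | 0 => partials
  | n + 1 =>
    if partials = [] then partials
    else branchesAltLoop n rabbitsLeft
      (partials.flatMap (fun p =>
        (PySem.List.pyRange (p.1 + 1) (rabbitsLeft - n + 1) 1).map (fun j => (j, p.2 ++ [j]))))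

def branches_alt (bunniesLeft : Int) (currentBranch : Int) (rabbitsLeft : Int) (items : List Int) : List (List Int) :=
  if bunniesLeft = 0 then [items]
  else if 0 < bunniesLeft ∧ currentBranch ≤ rabbitsLeft then
    (branchesAltLoop bunniesLeft.toNat rabbitsLeft [(currentBranch, items)]).map Prod.snd
  else []  -- Python B returns None here; excluded by Pre_branches

-- ===== PRECONDITION & SPEC =====
-- Pre_ excludes (a) the inputs (bunniesLeft < 0, or bunniesLeft > 0 with currentBranch > rabbitsLeft)
-- on which Python A falls off the end and returns None, which is not a list of lists, and
-- (b) the inputs whose recursion depth bunniesLeft exceeds the runner's recursion limit, where A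
-- raises RecursionError (depth bunniesLeft is reached exactly when currentBranch + bunniesLeft ≤ rabbitsLeft).
def Pre_branches (bunniesLeft : Int) (currentBranch : Int) (rabbitsLeft : Int) (items : List Int) : Prop :=
  (bunniesLeft = 0 ∨ (0 < bunniesLeft ∧ currentBranch ≤ rabbitsLeft)) ∧
    ¬ (10000 ≤ bunniesLeft ∧ currentBranch + bunniesLeft ≤ rabbitsLeft)
instance (bunniesLeft : Int) (currentBranch : Int) (rabbitsLeft : Int) (items : List Int) : Decidable (Pre_branches bunniesLeft currentBranch rabbitsLeft items) := by unfold Pre_branches; infer_instance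
def pvWitness_branches : Int × Int × Int × List Int := (2, 0, 4, [])

def Spec_branches (bunniesLeft : Int) (currentBranch : Int) (rabbitsLeft : Int) (items : List Int) (out : List (List Int)) : Prop := out = branches_alt bunniesLeft currentBranch rabbitsLeft items
instance (bunniesLeft : Int) (currentBranch : Int) (rabbitsLeft : Int) (items : List Int) (out : List (List Int)) : Decidable (Spec_branches bunniesLeft currentBranch rabbitsLeft items out) := by unfold Spec_branches; infer_instance

-- ===== CLAIM (what is proved, stated in full; the proofs are below) =====
def Claim_equal_branches : Prop := ∀ (bunniesLeft : Int) (currentBranch : Int) (rabbitsLeft : Int) (items : List Int), Dom_branches bunniesLeft currentBranch rabbitsLeft items → Pre_branches bunniesLeft currentBranch rabbitsLeft items → Spec_branches bunniesLeft currentBranch rabbitsLeft items (branches bunniesLeft currentBranch rabbitsLeft items)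

-- ===== LEMMAS AND PROOFS =====

-- canonical enumeration: all strictly increasing n-tuples from (last, rab], in lex order
def combs (n : Nat) (last : Int) (rab : Int) : List (List Int) :=
  match n with
  | 0 => [[]]
  | n + 1 => (PySem.List.pyRange (last + 1) (rab + 1) 1).flatMap
      (fun j => (combs n j rab).map (fun c => j :: c))

theorem combs_nil (n : Nat) (last rab : Int) (hn : 1 ≤ n) (h : rab < last + n) :
    combs n last rab = [] := by
  induction n generalizing last with
  | zero => omega
  | succ m ih =>
    match m with
    | 0 =>
      simp only [combs, PySem.List.pyRange_one]
      have h0 : (rab + 1 - (last + 1)).toNat = 0 := by omega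
      simp
      intro a; omega
    | k + 1 =>
      simp only [combs]
      rw [List.flatMap_eq_nil_iff]
      intro j hj
      rw [PySem.List.mem_pyRange_one] at hj
      show List.map _ (combs (k + 1) j rab) = []
      rw [ih j (by omega) (by push_cast; push_cast at h; omega)]
      rfl

theorem flatMap_congr_mem {α β : Type} {l : List α} {f g : α → List β}
    (h : ∀ x ∈ l, f x = g x) : l.flatMap f = l.flatMap g := by
  induction l with
  | nil => rfl
  | cons x xs ih =>
    simp only [List.flatMap_cons]
    rw [h x (by simp), ih (fun y hy => h y (by simp [hy]))]

-- restricting a range-flatMap to its live prefix: entries ≥ c contribute []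
theorem flatMap_pyRange_trunc {α : Type} (f : Int → List α) (a c b : Int)
    (hcb : c ≤ b) (hf : ∀ j, c ≤ j → j < b → f j = []) :
    (PySem.List.pyRange a b 1).flatMap f = (PySem.List.pyRange a c 1).flatMap f := by
  by_cases hac : a ≤ c
  · rw [PySem.List.pyRange_one_append a c b hac hcb, List.flatMap_append]
    have hz : (PySem.List.pyRange c b 1).flatMap f = [] := by
      rw [List.flatMap_eq_nil_iff]
      intro j hj; rw [PySem.List.mem_pyRange_one] at hj; exact hf j hj.1 hj.2
    rw [hz, List.append_nil]
  · rw [not_le] at hac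
    rw [PySem.List.pyRange_one_eq_nil (le_of_lt hac)]
    simp only [List.flatMap_nil]
    rw [List.flatMap_eq_nil_iff]
    intro j hj; rw [PySem.List.mem_pyRange_one] at hj
    exact hf j (by omega) hj.2

theorem branches_eq_combs (n : Nat) (bl cur rab : Int) (items : List Int)
    (hbl : bl = (n : Int)) (h : bl = 0 ∨ (0 < bl ∧ cur ≤ rab)) :
    branches bl cur rab items = (combs n cur rab).map (fun c => items ++ c) := by
  induction n generalizing bl cur items with
  | zero => subst hbl; rw [branches]; simp [combs]
  | succ m ih =>
    push_cast at hbl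
    have hb0 : ¬ bl = 0 := by omega
    have hpos : 0 < bl ∧ cur ≤ rab := by
      rcases h with h | h
      · omega
      · exact h
    rw [branches, if_neg hb0, dif_pos hpos]
    have step1 : (PySem.List.pyRange (cur + 1) (rab - bl + 2) 1).flatMap
          (fun i => branches (bl - 1) i rab (items ++ [i]))
        = (PySem.List.pyRange (cur + 1) (rab - bl + 2) 1).flatMap
          (fun i => (combs m i rab).map (fun c => items ++ i :: c)) := by
      apply flatMap_congr_mem
      intro i hi
      rw [PySem.List.mem_pyRange_one] at hi
      rw [ih (bl - 1) i (items ++ [i]) (by omega)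
          (by rcases Nat.eq_zero_or_pos m with hm | hm
              · left; omega
              · right; constructor <;> omega)]
      simp
    rw [step1]
    have step2 : (combs (m + 1) cur rab).map (fun c => items ++ c)
        = (PySem.List.pyRange (cur + 1) (rab + 1) 1).flatMap
          (fun j => (combs m j rab).map (fun c => items ++ j :: c)) := by
      simp only [combs, List.map_flatMap, List.map_map]
      rfl
    rw [step2]
    rw [flatMap_pyRange_trunc _ (cur + 1) (rab - bl + 2) (rab + 1) (by omega)]
    intro j hj1 hj2
    match m, hbl with
    | 0, hbl => omega
    | k + 1, hbl =>
      rw [combs_nil (k + 1) j rab (by omega) (by push_cast; push_cast at hbl; omega)]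
      rfl

theorem altLoop_eq_combs (n : Nat) (rab : Int) (P : List (Int × List Int)) :
    (branchesAltLoop n rab P).map Prod.snd
      = P.flatMap (fun p => (combs n p.1 rab).map (fun c => p.2 ++ c)) := by
  induction n generalizing P with
  | zero =>
    simp only [branchesAltLoop, combs, List.map_singleton]
    induction P with
    | nil => rfl
    | cons q Q ihp => simp_all
  | succ m ih =>
    rw [branchesAltLoop]
    by_cases hP : P = []
    · subst hP; simp
    · rw [if_neg hP, ih, List.flatMap_assoc]
      apply flatMap_congr_mem
      intro p _
      rw [List.flatMap_map]
      have hfull : (combs (m + 1) p.1 rab).map (fun c => p.2 ++ c)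
          = (PySem.List.pyRange (p.1 + 1) (rab + 1) 1).flatMap
            (fun j => (combs m j rab).map (fun c => p.2 ++ j :: c)) := by
        simp only [combs, List.map_flatMap, List.map_map]
        rfl
      have hz : ∀ j, rab - m + 1 ≤ j → j < rab + 1 →
          (combs m j rab).map (fun c => p.2 ++ j :: c) = [] := by
        intro j hj1 hj2
        match m with
        | 0 => omega
        | k + 1 =>
          rw [combs_nil (k + 1) j rab (by omega) (by push_cast; omega)]
          rfl
      rw [hfull, flatMap_pyRange_trunc _ (p.1 + 1) (rab - m + 1) (rab + 1) (by omega) hz]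
      apply flatMap_congr_mem
      intro j _
      simp

-- ===== VERDICT (by name: the statement is the Claim_ definition above) =====
theorem branches_spec : Claim_equal_branches := by
  intro bl cur rab items _ hpre
  unfold Spec_branches branches_alt
  rcases hpre.1 with h0 | hpos
  · subst h0
    rw [branches_eq_combs 0 0 cur rab items rfl (Or.inl rfl)]
    simp [combs]
  · have hn : bl = ((bl.toNat : Nat) : Int) := by omega
    rw [branches_eq_combs bl.toNat bl cur rab items hn (Or.inr hpos)]
    rw [if_neg (by omega), if_pos hpos, altLoop_eq_combs]
    simp
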